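-- pv_equiv track=rewrite | github.com/MuhammedYahiya/Python-Basic | Week 1/print.py | remove_vowels_from_end
-- ===== SOURCE A (Python) =====
-- def remove_vowels_from_end(s):
--     vowels = "aeiouAEIOU"
--     result = ""
--
--     for char in s[::-1]:
--         if char not in vowels:
--             result = char + result
--         elif result == "":
--             continue
--         else:
--             break
--
--     return result
-- ===== SOURCE B (Python) =====
-- def remove_vowels_from_end(s):
--     vowels = "aeiouAEIOU"
--     last = cur = ""
--     for c in s:
--         if c in vowels:
--             cur = ""
--         else:
--             cur += c
--             last = cur
--     return last
-- ===== Notes on version B (the rewrite author's own statement) =====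
-- stated objective: simpler
-- what changed: B scans the string once forward, tracking the current and last maximal non-vowel run, instead of reversing the string and accumulating by prepending with skip/break branches.
import Mathlib
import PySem

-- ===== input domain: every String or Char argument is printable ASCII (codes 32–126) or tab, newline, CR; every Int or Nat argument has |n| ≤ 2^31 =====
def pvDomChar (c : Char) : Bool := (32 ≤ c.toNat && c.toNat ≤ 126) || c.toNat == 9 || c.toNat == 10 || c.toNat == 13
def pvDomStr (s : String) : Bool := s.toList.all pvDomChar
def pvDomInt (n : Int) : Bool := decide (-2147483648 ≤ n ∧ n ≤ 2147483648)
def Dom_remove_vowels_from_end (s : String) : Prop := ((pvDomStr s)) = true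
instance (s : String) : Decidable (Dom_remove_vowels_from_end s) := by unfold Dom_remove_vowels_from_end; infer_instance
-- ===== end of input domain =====

-- B replaces A's reversed accumulation loop (with skip/break branches) by a single
-- forward scan tracking the current and last maximal non-vowel run; objective: simpler.

-- ===== PORT A =====
-- vowels = "aeiouAEIOU"; `char in vowels` for a single char = list membership of the char
def pvVowelsA : List Char := "aeiouAEIOU".toList

-- the for-loop over s[::-1] with break: structural recursion over the reversed char list,
-- `result` kept as a list of chars (char + result = prepend), returned as a String at the end
def removeVowelsGoA : List Char → List Char → List Char
  | [], result => result
  | c :: rest, result =>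
    if c ∉ pvVowelsA then removeVowelsGoA rest (c :: result)
    else if result = [] then removeVowelsGoA rest result
    else result

def remove_vowels_from_end (s : String) : String :=
  -- s[::-1] is exactly reversal of the character sequence
  String.mk (removeVowelsGoA s.toList.reverse [])

-- ===== PORT B =====
def pvVowelsB : List Char := "aeiouAEIOU".toList

-- forward fold over s; state = (last, cur): the last completed/ongoing non-vowel run and the
-- current trailing non-vowel run (strings kept as char lists; cur += c / last = cur)
def removeVowelsStepB (st : List Char × List Char) (c : Char) : List Char × List Char :=
  if c ∈ pvVowelsB then (st.1, [])
  else (st.2 ++ [c], st.2 ++ [c])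

def remove_vowels_from_end_alt (s : String) : String :=
  String.mk (s.toList.foldl removeVowelsStepB ([], [])).1

-- ===== PRECONDITION & SPEC =====
def Spec_remove_vowels_from_end (s : String) (out : String) : Prop := out = remove_vowels_from_end_alt s
instance (s : String) (out : String) : Decidable (Spec_remove_vowels_from_end s out) := by unfold Spec_remove_vowels_from_end; infer_instance

-- ===== CLAIM (what is proved, stated in full; the proofs are below) =====
def Claim_equal_remove_vowels_from_end : Prop := ∀ (s : String), Dom_remove_vowels_from_end s → Spec_remove_vowels_from_end s (remove_vowels_from_end s)

-- ===== LEMMAS AND PROOFS =====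

-- once A's accumulator is nonempty, A just takes the leading non-vowel run of the rest
theorem goA_pos (r acc : List Char) (h : acc ≠ []) :
    removeVowelsGoA r acc = (r.takeWhile (fun c => decide (c ∉ pvVowelsA))).reverse ++ acc := by
  induction r generalizing acc with
  | nil => simp [removeVowelsGoA]
  | cons c rest ih =>
    by_cases hc : c ∈ pvVowelsA
    · simp [removeVowelsGoA, hc, h, List.takeWhile]
    · simp [removeVowelsGoA, hc, List.takeWhile, ih (c :: acc) (by simp)]

-- B's fold state after l: (A's answer on l, trailing non-vowel run of l)
theorem foldB_char (l : List Char) :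
    l.foldl removeVowelsStepB ([], []) =
      (removeVowelsGoA l.reverse [],
       (l.reverse.takeWhile (fun c => decide (c ∉ pvVowelsA))).reverse) := by
  induction l using List.reverseRecOn with
  | nil => simp [removeVowelsGoA]
  | append_singleton l c ih =>
    rw [List.foldl_append, ih]
    have hBA : pvVowelsB = pvVowelsA := rfl
    by_cases hc : c ∈ pvVowelsA
    · simp [removeVowelsStepB, hBA, hc, removeVowelsGoA]
    · simp [removeVowelsStepB, hBA, hc, removeVowelsGoA,
        goA_pos _ [c] (by simp)]

-- ===== VERDICT (by name: the statement is the Claim_ definition above) =====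
theorem remove_vowels_from_end_spec : Claim_equal_remove_vowels_from_end := by
  intro s _
  show _ = _
  unfold remove_vowels_from_end remove_vowels_from_end_alt
  rw [foldB_char]
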